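-- pv_equiv track=rewrite | github.com/Pidongg/pdq_evaluation | read_files.py | are_classes_same
-- ===== SOURCE A (Python) =====
-- def are_classes_same(class_1, class_2):
--     """
--     Synonym handling
--     :param class_1: First class name string
--     :param class_2: Second class name string
--     :return: Boolean dictating if two class name strings are equivalent
--     """
--     class_1 = class_1.lower()
--     class_2 = class_2.lower()
--     if class_1 == class_2:
--         return True
--     for synset in [
--         {'background', '__background__', '__bg__', 'none'},
--         {'motorcycle', 'motorbike'},
--         {'aeroplane', 'airplane'},
--         {'traffic light', 'trafficlight'},
--         {'sofa', 'couch'},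
--         {'pottedplant', 'potted plant'},
--         {'diningtable', 'dining table'},
--         {'stop sign', 'stopsign'},
--         {'tvmonitor', 'tv', 'television', 'computer monitor'}
--     ]:
--         if class_1 in synset and class_2 in synset:
--             return True
--         elif class_1 in synset or class_2 in synset:
--             # Each class should only ever be in 1 sysnset, fail out if we found only one
--             return False
--     return False
-- ===== SOURCE B (Python) =====
-- _CANON = {
--     '__background__': 'background', '__bg__': 'background', 'none': 'background',
--     'motorbike': 'motorcycle',
--     'airplane': 'aeroplane',
--     'trafficlight': 'traffic light',
--     'couch': 'sofa',
--     'potted plant': 'pottedplant',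
--     'dining table': 'diningtable',
--     'stopsign': 'stop sign',
--     'tv': 'tvmonitor', 'television': 'tvmonitor', 'computer monitor': 'tvmonitor',
-- }
--
--
-- def are_classes_same(class_1, class_2):
--     """
--     Synonym handling
--     :param class_1: First class name string
--     :param class_2: Second class name string
--     :return: Boolean dictating if two class name strings are equivalent
--     """
--     class_1 = class_1.lower()
--     class_2 = class_2.lower()
--     return _CANON.get(class_1, class_1) == _CANON.get(class_2, class_2)
-- ===== Notes on version B (the rewrite author's own statement) =====
-- stated objective: simpler
-- what changed: Replaced the ordered scan over synonym sets with its equality guard and early True/False returns by a single alias-to-canonical-representative dict and one comparison of the two canonical forms.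
import Mathlib
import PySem

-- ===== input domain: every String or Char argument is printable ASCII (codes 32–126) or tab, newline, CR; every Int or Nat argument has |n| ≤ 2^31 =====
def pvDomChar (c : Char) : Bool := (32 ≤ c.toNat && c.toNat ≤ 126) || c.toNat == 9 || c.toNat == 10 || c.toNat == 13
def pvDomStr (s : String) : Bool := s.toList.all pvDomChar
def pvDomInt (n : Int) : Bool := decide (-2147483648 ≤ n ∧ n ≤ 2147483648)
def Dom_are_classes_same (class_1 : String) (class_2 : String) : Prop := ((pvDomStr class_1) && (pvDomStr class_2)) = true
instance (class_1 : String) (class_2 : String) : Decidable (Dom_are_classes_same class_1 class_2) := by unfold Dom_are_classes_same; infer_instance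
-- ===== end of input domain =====

-- B replaces A's ordered scan over synonym sets (equality guard, per-set membership tests,
-- early True/False returns) by one canonicalisation dict alias→representative and a single
-- comparison of the two canonical forms (objective: simpler).

-- ===== PORT A =====
def pvSynsetsA : List (PySem.Set String) :=
  [PySem.Set.ofList ["background", "__background__", "__bg__", "none"],
   PySem.Set.ofList ["motorcycle", "motorbike"],
   PySem.Set.ofList ["aeroplane", "airplane"],
   PySem.Set.ofList ["traffic light", "trafficlight"],
   PySem.Set.ofList ["sofa", "couch"],
   PySem.Set.ofList ["pottedplant", "potted plant"],
   PySem.Set.ofList ["diningtable", "dining table"],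
   PySem.Set.ofList ["stop sign", "stopsign"],
   PySem.Set.ofList ["tvmonitor", "tv", "television", "computer monitor"]]

-- the 'for synset in […]' loop with its three-way branch and early returns
def pvLoopA (c1 c2 : String) : List (PySem.Set String) → Bool
  | [] => false
  | synset :: rest =>
    if PySem.Set.contains synset c1 && PySem.Set.contains synset c2 then true
    else if PySem.Set.contains synset c1 || PySem.Set.contains synset c2 then false
    else pvLoopA c1 c2 rest

def are_classes_same (class_1 : String) (class_2 : String) : Bool :=
  let class_1 := PySem.Str.lower class_1
  let class_2 := PySem.Str.lower class_2
  if class_1 == class_2 then true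
  else pvLoopA class_1 class_2 pvSynsetsA

-- ===== PORT B =====
-- _CANON: alias → canonical representative
def pvCanon : PySem.Dict String String :=
  PySem.Dict.mk
    [("__background__", "background"), ("__bg__", "background"), ("none", "background"),
     ("motorbike", "motorcycle"),
     ("airplane", "aeroplane"),
     ("trafficlight", "traffic light"),
     ("couch", "sofa"),
     ("potted plant", "pottedplant"),
     ("dining table", "diningtable"),
     ("stopsign", "stop sign"),
     ("tv", "tvmonitor"), ("television", "tvmonitor"), ("computer monitor", "tvmonitor")]

def are_classes_same_alt (class_1 : String) (class_2 : String) : Bool :=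
  let class_1 := PySem.Str.lower class_1
  let class_2 := PySem.Str.lower class_2
  PySem.Dict.getD pvCanon class_1 class_1 == PySem.Dict.getD pvCanon class_2 class_2

-- ===== PRECONDITION & SPEC =====
def Spec_are_classes_same (class_1 : String) (class_2 : String) (out : Bool) : Prop := out = are_classes_same_alt class_1 class_2
instance (class_1 : String) (class_2 : String) (out : Bool) : Decidable (Spec_are_classes_same class_1 class_2 out) := by unfold Spec_are_classes_same; infer_instance

-- ===== CLAIM (what is proved, stated in full; the proofs are below) =====
def Claim_equal_are_classes_same : Prop := ∀ (class_1 : String) (class_2 : String), Dom_are_classes_same class_1 class_2 → Spec_are_classes_same class_1 class_2 (are_classes_same class_1 class_2)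

-- ===== LEMMAS AND PROOFS =====

-- the representative of each synset (first word)
def pvReps : List String :=
  ["background", "motorcycle", "aeroplane", "traffic light", "sofa",
   "pottedplant", "diningtable", "stop sign", "tvmonitor"]

-- A's loop returns true iff the first synset touching either word contains both,
-- i.e. iff both words get the same first index.
theorem pvLoopA_eq_findIdx (a b : String) (ss : List (PySem.Set String)) :
    pvLoopA a b ss
      = ((ss.findIdx? (fun s => PySem.Set.contains s a)).isSome
          && (ss.findIdx? (fun s => PySem.Set.contains s a)
              == ss.findIdx? (fun s => PySem.Set.contains s b))) := by
  induction ss with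
  | nil => simp [pvLoopA]
  | cons s ss ih =>
    simp only [pvLoopA, List.findIdx?_cons]
    cases ha : PySem.Set.contains s a <;> cases hb : PySem.Set.contains s b
    · simp only [Bool.false_and, Bool.false_or, if_neg Bool.false_ne_true, ih]
      cases hra : ss.findIdx? (fun s => PySem.Set.contains s a) <;>
        cases hrb : ss.findIdx? (fun s => PySem.Set.contains s b) <;>
          simp
    · simp only [Bool.false_and, Bool.false_or, if_neg Bool.false_ne_true]
      cases hra : ss.findIdx? (fun s => PySem.Set.contains s a) <;> simp
    · simp only [Bool.true_and, Bool.true_or, if_neg Bool.false_ne_true]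
      cases hrb : ss.findIdx? (fun s => PySem.Set.contains s b) <;> simp
    · simp

theorem pvFindIdx_lt_length {α : Type} (p : α → Bool) :
    ∀ (l : List α) (i : Nat), l.findIdx? p = some i → i < l.length := by
  intro l
  induction l with
  | nil => intro i h; simp [List.findIdx?_nil] at h
  | cons x xs ih =>
    intro i h
    rw [List.findIdx?_cons] at h
    by_cases hp : p x = true
    · simp [hp] at h
      simp only [List.length_cons]
      omega
    · simp [hp] at h
      obtain ⟨j, hj, hji⟩ := h
      have h2 := ih j hj
      simp only [List.length_cons]
      omega

-- B's canonicalisation is the representative of the word's first synset (or the word itself)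
set_option maxHeartbeats 1000000 in
theorem pvCanon_char (s : String) :
    PySem.Dict.getD pvCanon s s
      = (match pvSynsetsA.findIdx? (fun t => PySem.Set.contains t s) with
         | some i => pvReps.getD i s
         | none => s) := by
  by_cases h0 : s = "background"
  · subst h0; decide
  by_cases h1 : s = "__background__"
  · subst h1; decide
  by_cases h2 : s = "__bg__"
  · subst h2; decide
  by_cases h3 : s = "none"
  · subst h3; decide
  by_cases h4 : s = "motorcycle"
  · subst h4; decide
  by_cases h5 : s = "motorbike"
  · subst h5; decide
  by_cases h6 : s = "aeroplane"
  · subst h6; decide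
  by_cases h7 : s = "airplane"
  · subst h7; decide
  by_cases h8 : s = "traffic light"
  · subst h8; decide
  by_cases h9 : s = "trafficlight"
  · subst h9; decide
  by_cases h10 : s = "sofa"
  · subst h10; decide
  by_cases h11 : s = "couch"
  · subst h11; decide
  by_cases h12 : s = "pottedplant"
  · subst h12; decide
  by_cases h13 : s = "potted plant"
  · subst h13; decide
  by_cases h14 : s = "diningtable"
  · subst h14; decide
  by_cases h15 : s = "dining table"
  · subst h15; decide
  by_cases h16 : s = "stop sign"
  · subst h16; decide
  by_cases h17 : s = "stopsign"
  · subst h17; decide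
  by_cases h18 : s = "tvmonitor"
  · subst h18; decide
  by_cases h19 : s = "tv"
  · subst h19; decide
  by_cases h20 : s = "television"
  · subst h20; decide
  by_cases h21 : s = "computer monitor"
  · subst h21; decide
  simp [pvCanon, pvSynsetsA, PySem.Set.contains, PySem.Dict.getD, PySem.Dict.get?,
    List.findIdx?_cons, List.findIdx?_nil,
    h0, Ne.symm h0, h1, Ne.symm h1, h2, Ne.symm h2, h3, Ne.symm h3, h4, Ne.symm h4,
    h5, Ne.symm h5, h6, Ne.symm h6, h7, Ne.symm h7, h8, Ne.symm h8, h9, Ne.symm h9,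
    h10, Ne.symm h10, h11, Ne.symm h11, h12, Ne.symm h12, h13, Ne.symm h13,
    h14, Ne.symm h14, h15, Ne.symm h15, h16, Ne.symm h16, h17, Ne.symm h17,
    h18, Ne.symm h18, h19, Ne.symm h19, h20, Ne.symm h20, h21, Ne.symm h21]

-- each representative belongs to its own synset (so canonical forms collide only within a synset)
theorem pvRep_findIdx (i : Nat) (h : i < 9) (s : String) :
    pvSynsetsA.findIdx? (fun t => PySem.Set.contains t (pvReps.getD i s)) = some i := by
  interval_cases i <;> simp [pvReps, List.getD] <;> decide

-- the whole body after lowering: A's guarded scan equals B's canonical comparison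
theorem pvKey (x y : String) :
    (if x == y then true else pvLoopA x y pvSynsetsA)
      = (PySem.Dict.getD pvCanon x x == PySem.Dict.getD pvCanon y y) := by
  by_cases hxy : x = y
  · subst hxy; simp
  · have hb : (x == y) = false := by simp [hxy]
    rw [if_neg (by simp [hxy]), pvLoopA_eq_findIdx, pvCanon_char x, pvCanon_char y]
    cases ha : pvSynsetsA.findIdx? (fun t => PySem.Set.contains t x) <;>
      cases hc : pvSynsetsA.findIdx? (fun t => PySem.Set.contains t y)
    · simp [hxy]
    · -- x matched nothing, y is in synset j: canon x = x cannot be rep j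
      rename_i j
      have hj : j < 9 := pvFindIdx_lt_length _ _ _ hc
      have hx : x ≠ pvReps.getD j y := by
        intro hx
        have h3 := pvRep_findIdx j hj y
        rw [← hx] at h3
        rw [ha] at h3
        simp at h3
      cases hxe : (x == pvReps.getD j y) with
      | false => simp [hxe]
      | true => exact absurd (eq_of_beq hxe) hx
    · -- symmetric
      rename_i i
      have hi : i < 9 := pvFindIdx_lt_length _ _ _ ha
      have hy : pvReps.getD i x ≠ y := by
        intro hy
        have h3 := pvRep_findIdx i hi x
        rw [hy] at h3
        rw [hc] at h3
        simp at h3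
      cases hye : (pvReps.getD i x == y) with
      | false => simp [hye]
      | true => exact absurd (eq_of_beq hye) hy
    · rename_i i j
      have hi : i < 9 := pvFindIdx_lt_length _ _ _ ha
      have hj : j < 9 := pvFindIdx_lt_length _ _ _ hc
      interval_cases i <;> interval_cases j <;> simp [pvReps, List.getD] <;> decide
-- ===== VERDICT (by name: the statement is the Claim_ definition above) =====
theorem are_classes_same_spec : Claim_equal_are_classes_same := by
  intro c1 c2 _
  unfold Spec_are_classes_same are_classes_same are_classes_same_alt
  exact pvKey (PySem.Str.lower c1) (PySem.Str.lower c2)
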